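-- pv_equiv track=rewrite | github.com/chaojun-wang/progressive-translation | scripts/iwslt/pt/extract_targeted_seq.py | extract_targeted_sequence
-- ===== SOURCE A (Python) =====
-- def extract_single_sequence(line, current_task_token, special_tokens, twin_line=None):
--     ordered_special_token_index = sorted([line.index(i) for i in special_tokens if i in line])
--     current_task_token_index = line.index(current_task_token)
--     pos_of_current_task_token = ordered_special_token_index.index(current_task_token_index)
--     if not twin_line:
--         output = line[current_task_token_index+1:ordered_special_token_index[pos_of_current_task_token+1]]
--     else:
--         assert len(line) == len(twin_line)
--         output = twin_line[current_task_token_index+1:ordered_special_token_index[pos_of_current_task_token+1]]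
--     return output
--
-- def extract_targeted_sequence(hybrid_text_align_document, task):
--     output = ""
--     special_tokens = {"<LEX>", "<ALI>", "<TGT>", "<EOS>"}
--     current_task_token = "<{}>".format(task.upper())
--     if hybrid_text_align_document.startswith("\n"):
--         hybrid_text_align_document = " " + hybrid_text_align_document
--     hybrid_text_align_document = hybrid_text_align_document[:-1].split("\n")
--     for line in hybrid_text_align_document:
--         line = line.split(" ")
--         if current_task_token not in line:
--             output += " " + "\n"
--             continue
--         line.append("<EOS>")
--         tmp = extract_single_sequence(line, current_task_token, special_tokens)
--         output += " ".join(tmp) + "\n"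
--     return output
-- ===== SOURCE B (Python) =====
-- def extract_targeted_sequence(hybrid_text_align_document, task):
--     special_tokens = ("<LEX>", "<ALI>", "<TGT>", "<EOS>")
--     current_task_token = "<{}>".format(task.upper())
--     if hybrid_text_align_document.startswith("\n"):
--         hybrid_text_align_document = " " + hybrid_text_align_document
--     pieces = hybrid_text_align_document[:-1].split("\n")
--     chunks = []
--     for line in pieces:
--         toks = line.split(" ")
--         if current_task_token not in toks:
--             chunks.append(" ")
--             continue
--         toks.append("<EOS>")
--         t = toks.index(current_task_token)
--         boundary = min(toks.index(s) for s in special_tokens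
--                        if s in toks and toks.index(s) > t)
--         chunks.append(" ".join(toks[t + 1:boundary]))
--     return "\n".join(chunks) + "\n"
-- ===== Notes on version B (the rewrite author's own statement) =====
-- stated objective: simpler
-- what changed: Replaces the helper's sort-all-special-indices / locate-task-position / take-next-entry logic with a direct minimum over first-occurrence indices of special tokens beyond the task token, and assembles the result by joining per-line chunks instead of string-concatenating inside the loop.
import Mathlib
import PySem

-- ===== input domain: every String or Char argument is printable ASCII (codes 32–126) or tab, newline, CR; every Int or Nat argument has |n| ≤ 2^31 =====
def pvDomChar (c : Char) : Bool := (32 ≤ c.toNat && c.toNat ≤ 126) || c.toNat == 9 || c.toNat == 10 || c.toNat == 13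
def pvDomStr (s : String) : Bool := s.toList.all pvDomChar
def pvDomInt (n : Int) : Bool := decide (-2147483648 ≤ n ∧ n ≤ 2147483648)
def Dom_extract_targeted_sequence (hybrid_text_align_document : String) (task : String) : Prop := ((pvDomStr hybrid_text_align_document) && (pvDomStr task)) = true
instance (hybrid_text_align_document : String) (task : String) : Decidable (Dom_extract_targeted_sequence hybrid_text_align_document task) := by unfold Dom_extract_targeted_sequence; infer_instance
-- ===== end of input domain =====

-- B replaces A's sort-the-indices / locate-position / take-next-entry helper by a direct
-- "minimum first-occurrence index of a special token beyond the task token", and assembles the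
-- output by joining per-line chunks instead of concatenating inside the loop (objective: simpler).

-- ===== PORT A =====
-- Python's set literal {"<LEX>","<ALI>","<TGT>","<EOS>"}: it is only used through membership
-- tests and a sorted(...) over first-occurrence indices, so its iteration order is immaterial.
def pvSpecials : List String := ["<LEX>", "<ALI>", "<TGT>", "<EOS>"]

-- literal port of extract_single_sequence; the .getD defaults stand where Python raises
-- (ValueError from .index, IndexError from ordered[pos+1]) — those inputs are outside Pre_.
def extract_single_sequence (line : List String) (current_task_token : String)
    (special_tokens : PySem.Set String) (twin_line : Option (List String)) : List String :=
  let ordered := PySem.List.sorted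
    ((special_tokens.filter (fun i => line.contains i)).map
      (fun i => (PySem.List.index? line i).getD 0)) (fun x => x) false
  let cti := (PySem.List.index? line current_task_token).getD 0
  let pos := (PySem.List.index? ordered cti).getD 0
  let hi := (PySem.List.pyGet? ordered ((pos + 1 : Nat) : Int)).getD 0
  match twin_line with
  | none => PySem.List.slice line (some ((cti + 1 : Nat) : Int)) (some ((hi : Nat) : Int))
  | some tw => PySem.List.slice tw (some ((cti + 1 : Nat) : Int)) (some ((hi : Nat) : Int))

def extract_targeted_sequence (hybrid_text_align_document : String) (task : String) : String :=
  let special_tokens : PySem.Set String := PySem.Set.ofList pvSpecials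
  let current_task_token : String := "<" ++ PySem.Str.upper task ++ ">"
  let doc1 := if PySem.Str.startswith hybrid_text_align_document "\n"
              then " " ++ hybrid_text_align_document else hybrid_text_align_document
  let pieces := (PySem.Str.split? (PySem.Str.slice doc1 none (some (-1))) "\n").getD []
  pieces.foldl (fun output line =>
    let toks := (PySem.Str.split? line " ").getD []
    if !(toks.contains current_task_token) then output ++ " " ++ "\n"
    else
      let toks2 := toks ++ ["<EOS>"]
      let tmp := extract_single_sequence toks2 current_task_token special_tokens none
      output ++ PySem.Str.join " " tmp ++ "\n") ""

-- ===== PORT B =====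
-- first-occurrence indices of special tokens strictly beyond position t (the min's generator)
def pvBoundaryCands (specials : List String) (toks : List String) (t : Nat) : List Nat :=
  specials.filterMap (fun s =>
    match PySem.List.index? toks s with
    | some j => if t < j then some j else none
    | none => none)

-- port of Source B's _chunk; the .getD 0 stands where Python's empty min() raises ValueError — outside Pre_.
def pvChunk (line : String) (ctt : String) (specials : List String) : String :=
  let toks := (PySem.Str.split? line " ").getD []
  if !(toks.contains ctt) then " "
  else
    let toks2 := toks ++ ["<EOS>"]
    let t := (PySem.List.index? toks2 ctt).getD 0
    let bound := (PySem.List.min? (pvBoundaryCands specials toks2 t) (fun x => x)).getD 0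
    PySem.Str.join " " (PySem.List.slice toks2 (some ((t + 1 : Nat) : Int)) (some ((bound : Nat) : Int)))

def extract_targeted_sequence_alt (hybrid_text_align_document : String) (task : String) : String :=
  let ctt : String := "<" ++ PySem.Str.upper task ++ ">"
  let doc1 := if PySem.Str.startswith hybrid_text_align_document "\n"
              then " " ++ hybrid_text_align_document else hybrid_text_align_document
  let pieces := (PySem.Str.split? (PySem.Str.slice doc1 none (some (-1))) "\n").getD []
  PySem.Str.join "\n" (pieces.map (fun line => pvChunk line ctt pvSpecials)) ++ "\n"

-- ===== PRECONDITION & SPEC =====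
-- a line is fine when it lacks the task token, or the task token is a special token and some
-- special token first occurs strictly after it (Python raises ValueError/IndexError otherwise)
def pvLineOK (ctt : String) (line : String) : Bool :=
  let toks := (PySem.Str.split? line " ").getD []
  let toks2 := toks ++ ["<EOS>"]
  !(toks.contains ctt) ||
    (pvSpecials.contains ctt &&
      pvSpecials.any (fun s =>
        match PySem.List.index? toks2 s, PySem.List.index? toks2 ctt with
        | some j, some t => decide (t < j)
        | _, _ => false))

-- Pre_ excludes exactly the inputs where A raises (ValueError when the task token is present but
-- not special, IndexError when no special token first occurs after it); A returns on all of Pre_.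
def Pre_extract_targeted_sequence (hybrid_text_align_document : String) (task : String) : Prop :=
  let ctt : String := "<" ++ PySem.Str.upper task ++ ">"
  let doc1 := if PySem.Str.startswith hybrid_text_align_document "\n"
              then " " ++ hybrid_text_align_document else hybrid_text_align_document
  ∀ line ∈ (PySem.Str.split? (PySem.Str.slice doc1 none (some (-1))) "\n").getD [],
    pvLineOK ctt line = true
instance (hybrid_text_align_document : String) (task : String) : Decidable (Pre_extract_targeted_sequence hybrid_text_align_document task) := by unfold Pre_extract_targeted_sequence; infer_instance

def pvWitness_extract_targeted_sequence : String × String := ("<LEX> a b <TGT> c d\nx y\n", "lex")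

def Spec_extract_targeted_sequence (hybrid_text_align_document : String) (task : String) (out : String) : Prop := out = extract_targeted_sequence_alt hybrid_text_align_document task
instance (hybrid_text_align_document : String) (task : String) (out : String) : Decidable (Spec_extract_targeted_sequence hybrid_text_align_document task out) := by unfold Spec_extract_targeted_sequence; infer_instance

-- ===== CLAIM (what is proved, stated in full; the proofs are below) =====
def Claim_equal_extract_targeted_sequence : Prop := ∀ (hybrid_text_align_document : String) (task : String), Dom_extract_targeted_sequence hybrid_text_align_document task → Pre_extract_targeted_sequence hybrid_text_align_document task → Spec_extract_targeted_sequence hybrid_text_align_document task (extract_targeted_sequence hybrid_text_align_document task)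

-- ===== LEMMAS AND PROOFS =====

-- B's candidate list is A's index list filtered to the indices beyond t (generic in the token list)
theorem pv_cands_eq (l : List String) (toks : List String) (t : Nat) :
    l.filterMap (fun s =>
      match PySem.List.index? toks s with
      | some j => if t < j then some j else none
      | none => none)
    = ((l.filter (fun i => toks.contains i)).map
        (fun i => (PySem.List.index? toks i).getD 0)).filter (fun j => decide (t < j)) := by
  simp only [PySem.List.index?_eq_idxOf?]
  induction l with
  | nil => rfl
  | cons s rest ih =>
    rcases h : List.idxOf? s toks with _ | j
    · have hmem : s ∉ toks :=
        (PySem.List.index?_eq_none_iff toks s).mp (by simpa [PySem.List.index?_eq_idxOf?] using h)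
      simpa [List.filterMap_cons, List.filter_cons, h, hmem] using ih
    · have hmem : s ∈ toks :=
        (PySem.List.index?_isSome_iff toks s).mp (by simp [PySem.List.index?_eq_idxOf?, h])
      by_cases ht : t < j
      · simpa [List.filterMap_cons, List.filter_cons, h, hmem, ht] using ih
      · simpa [List.filterMap_cons, List.filter_cons, h, hmem, ht] using ih

-- the minimum value of a list of naturals is invariant under permutation
theorem pv_min?_perm {p q : List Nat} (h : p.Perm q) :
    PySem.List.min? p (fun x => x) = PySem.List.min? q (fun x => x) := by
  rcases hp : PySem.List.min? p (fun x => x) with _ | a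
  · rw [PySem.List.min?_eq_none_iff] at hp
    subst hp
    rw [List.Perm.eq_nil h.symm]
    rfl
  · rcases hq : PySem.List.min? q (fun x => x) with _ | b
    · rw [PySem.List.min?_eq_none_iff] at hq
      subst hq
      rw [List.Perm.eq_nil h] at hp
      simp [PySem.List.min?] at hp
    · have h1 : a ≤ b := PySem.List.min?_isMin hp b (h.symm.mem_iff.mp (PySem.List.min?_mem hq))
      have h2 : b ≤ a := PySem.List.min?_isMin hq a (h.mem_iff.mp (PySem.List.min?_mem hp))
      exact congrArg some (Nat.le_antisymm h1 h2)

theorem pv_foldl_min (x : Nat) (t : List Nat) (h : ∀ y ∈ t, x ≤ y) : t.foldl min x = x := by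
  induction t generalizing x with
  | nil => rfl
  | cons y ys ih =>
    rw [List.foldl_cons]
    have hx : min x y = x := by have := h y (by simp); omega
    rw [hx]
    exact ih x (fun z hz => h z (by simp [hz]))

-- on a strictly increasing list, min is the head
theorem pv_min?_sorted (l : List Nat) (h : l.Pairwise (· < ·)) :
    PySem.List.min? l (fun x => x) = l.head? := by
  cases l with
  | nil => rfl
  | cons x t =>
    rw [PySem.List.min?_id_cons]
    rw [pv_foldl_min x t (fun y hy => le_of_lt ((List.pairwise_cons.mp h).1 y hy))]
    rfl

-- in a strictly increasing list, the entry after t's position is the least element above t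
theorem pv_next_in_sorted (m : List Nat) (hm : m.Pairwise (· < ·)) (t : Nat) (ht : t ∈ m) :
    PySem.List.pyGet? m (((PySem.List.index? m t).getD 0 + 1 : Nat) : Int)
      = PySem.List.min? (m.filter (fun j => decide (t < j))) (fun x => x) := by
  induction m with
  | nil => cases ht
  | cons h tl ih =>
    rcases List.pairwise_cons.mp hm with ⟨hlt, htl⟩
    by_cases he : h = t
    · subst he
      rw [PySem.List.index?_cons_self]
      have hfil : (h :: tl).filter (fun j => decide (h < j)) = tl := by
        rw [List.filter_cons]
        simp only [decide_eq_true_eq]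
        rw [if_neg (by omega)]
        exact List.filter_eq_self.mpr (fun j hj => by simpa using hlt j hj)
      rw [hfil, pv_min?_sorted tl htl, Option.getD_some, PySem.List.pyGet?_natCast]
      simp [List.head?_eq_getElem?]
    · have htm : t ∈ tl := by cases ht with
        | head => exact absurd rfl he
        | tail _ h2 => exact h2
      have hlt' : h < t := hlt t htm
      rcases hk : PySem.List.index? tl t with _ | k
      · exact absurd htm ((PySem.List.index?_eq_none_iff tl t).mp hk)
      · rw [PySem.List.index?_cons_of_ne _ he, hk]
        have hfil : (h :: tl).filter (fun j => decide (t < j)) = tl.filter (fun j => decide (t < j)) := by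
          rw [List.filter_cons, if_neg (by simpa using Nat.not_lt.mpr (le_of_lt hlt'))]
        rw [hfil]
        have ihx := ih htl htm
        rw [hk] at ihx
        rw [PySem.List.pyGet?_natCast] at ihx ⊢
        simp only [Option.getD_some, Option.map_some] at ihx ⊢
        rw [← ihx]
        simp [List.getElem?_cons_succ]

-- per-line agreement of the two chunk computations on the lines Pre_ admits
theorem pv_chunk_eq (ctt line : String) (h : pvLineOK ctt line = true) :
    (let toks := (PySem.Str.split? line " ").getD []
     if !(toks.contains ctt) then " "
     else PySem.Str.join " " (extract_single_sequence (toks ++ ["<EOS>"]) ctt (PySem.Set.ofList pvSpecials) none))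
    = pvChunk line ctt pvSpecials := by
  have hS : PySem.Set.ofList pvSpecials = pvSpecials := by decide
  simp only [pvChunk, hS]
  set toks := (PySem.Str.split? line " ").getD [] with htoks
  by_cases hc : toks.contains ctt
  · simp only [hc, Bool.not_true, Bool.false_eq_true, if_false]
    set toks2 := toks ++ ["<EOS>"] with htoks2
    have hmem : ctt ∈ toks2 := List.mem_append_left _ (by simpa using hc)
    rcases hv : PySem.List.index? toks2 ctt with _ | tv
    · exact absurd hmem ((PySem.List.index?_eq_none_iff _ _).mp hv)
    -- the facts pvLineOK provides for this line
    rw [pvLineOK] at h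
    simp only [← htoks, ← htoks2, hc, Bool.not_true, Bool.false_or, Bool.and_eq_true] at h
    rcases h with ⟨hsp, hany⟩
    rcases List.any_eq_true.mp hany with ⟨s0, hs0mem, hs0⟩
    rcases hj0 : PySem.List.index? toks2 s0 with _ | j0
    · rw [hj0, hv] at hs0; simp at hs0
    rw [hj0, hv] at hs0
    have htvj0 : tv < j0 := by simpa using hs0
    -- A's index list and its sorted version
    set f : String → Nat := fun i => (PySem.List.index? toks2 i).getD 0 with hf
    set idxs := (pvSpecials.filter (fun i => toks2.contains i)).map f with hidxs
    have hnd : idxs.Nodup := by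
      apply List.Nodup.map_on
      · intro x hx y hy hxy
        have hxm : x ∈ toks2 := by simpa using (List.mem_filter.mp hx).2
        have hym : y ∈ toks2 := by simpa using (List.mem_filter.mp hy).2
        rcases hix : PySem.List.index? toks2 x with _ | jx
        · exact absurd hxm ((PySem.List.index?_eq_none_iff _ _).mp hix)
        rcases hiy : PySem.List.index? toks2 y with _ | jy
        · exact absurd hym ((PySem.List.index?_eq_none_iff _ _).mp hiy)
        rcases PySem.List.getElem_of_index?_eq_some hix with ⟨hkx, hgx, -⟩
        rcases PySem.List.getElem_of_index?_eq_some hiy with ⟨hky, hgy, -⟩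
        rw [hf] at hxy
        simp only [hix, hiy, Option.getD_some] at hxy
        subst hxy
        rw [← hgx, ← hgy]
      · exact List.Nodup.filter _ (by decide)
    set m := PySem.List.sorted idxs (fun x => x) false with hm
    have hperm : m.Perm idxs := PySem.List.sorted_perm idxs (fun x => x) false
    have hpw : m.Pairwise (· < ·) := by
      have hle : m.Pairwise (fun a b => a ≤ b) := PySem.List.sorted_pairwise idxs (fun x => x)
      have hne : m.Nodup := hperm.symm.nodup hnd
      exact (hle.and hne).imp (fun hab => lt_of_le_of_ne hab.1 hab.2)
    have htvidx : tv ∈ idxs := by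
      rw [hidxs]
      apply List.mem_map.mpr
      exact ⟨ctt, List.mem_filter.mpr ⟨by simpa using hsp, by simpa using hmem⟩,
        by rw [hf]; show (PySem.List.index? toks2 ctt).getD 0 = tv; rw [hv]; rfl⟩
    have htvm : tv ∈ m := (PySem.List.mem_sorted _ _ _ _).mpr htvidx
    -- A's next sorted entry = B's filtered minimum
    have hkey := pv_next_in_sorted m hpw tv htvm
    have hcands : pvBoundaryCands pvSpecials toks2 tv = idxs.filter (fun j => decide (tv < j)) := by
      rw [pvBoundaryCands, pv_cands_eq]
    have hmineq : PySem.List.min? (m.filter (fun j => decide (tv < j))) (fun x => x)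
        = PySem.List.min? (pvBoundaryCands pvSpecials toks2 tv) (fun x => x) := by
      rw [hcands]
      exact pv_min?_perm (hperm.filter _)
    have hnonnil : pvBoundaryCands pvSpecials toks2 tv ≠ [] := by
      intro hnil
      have : j0 ∈ pvBoundaryCands pvSpecials toks2 tv := by
        rw [pvBoundaryCands]
        exact List.mem_filterMap.mpr ⟨s0, hs0mem, by rw [hj0]; simp [htvj0]⟩
      rw [hnil] at this; cases this
    rcases hbv : PySem.List.min? (pvBoundaryCands pvSpecials toks2 tv) (fun x => x) with _ | bv
    · exact absurd ((PySem.List.min?_eq_none_iff _ _).mp hbv) hnonnil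
    simp only [extract_single_sequence]
    rw [← hidxs, ← hm]
    simp only [hv, Option.getD_some]
    rw [hkey, hmineq, hbv]
  · simp only [hc, Bool.not_false, if_true]

-- A's string-accumulating fold is 'join the chunks with newlines, plus a trailing newline'
theorem pv_foldl_join (chunks : List String) (acc : String) (h : chunks ≠ []) :
    chunks.foldl (fun o c => o ++ c ++ "\n") acc = acc ++ PySem.Str.join "\n" chunks ++ "\n" := by
  induction chunks generalizing acc with
  | nil => exact absurd rfl h
  | cons c cs ih =>
    cases cs with
    | nil =>
      apply String.toList_inj.mp
      simp [PySem.Str.toList_join, PySem.Chars.join_singleton, String.toList_append]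
    | cons c2 cs2 =>
      rw [List.foldl_cons]
      rw [ih (acc ++ c ++ "\n") (by simp)]
      apply String.toList_inj.mp
      simp [String.toList_append, PySem.Str.toList_join, PySem.Chars.join_cons_cons]

theorem pv_go_ne_nil (sep : List Char) : ∀ (fuel : Nat) (l cur : List Char) (acc : List (List Char)),
    PySem.Chars.splitOn.go sep fuel l cur acc ≠ [] := by
  intro fuel
  induction fuel with
  | zero => intro l cur acc; simp [PySem.Chars.splitOn.go]
  | succ n ih =>
    intro l cur acc
    cases l with
    | nil => simp [PySem.Chars.splitOn.go]
    | cons c rest =>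
      rw [PySem.Chars.splitOn.go]
      split
      · exact ih _ _ _
      · exact ih _ _ _

-- Python's str.split(sep) never returns an empty list
theorem pv_split_ne_nil (s : String) : (PySem.Str.split? s "\n").getD [] ≠ [] := by
  rw [PySem.Str.split?, PySem.Chars.split?]
  rw [if_neg (by simp)]
  simp only [Option.map_some, Option.getD_some, ne_eq, List.map_eq_nil_iff]
  rw [PySem.Chars.splitOn]
  exact pv_go_ne_nil _ _ _ _ _

-- ===== VERDICT (by name: the statement is the Claim_ definition above) =====
theorem extract_targeted_sequence_spec : Claim_equal_extract_targeted_sequence := by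
  intro doc task _hdom hpre
  unfold Spec_extract_targeted_sequence
  unfold extract_targeted_sequence extract_targeted_sequence_alt
  rw [Pre_extract_targeted_sequence] at hpre
  set ctt := "<" ++ PySem.Str.upper task ++ ">" with hctt
  set doc1 := (if PySem.Str.startswith doc "\n" then " " ++ doc else doc) with hdoc1
  set pieces := (PySem.Str.split? (PySem.Str.slice doc1 none (some (-1))) "\n").getD [] with hpieces
  have hpre' : ∀ line ∈ pieces, pvLineOK ctt line = true := hpre
  have hcongr : pieces.foldl (fun output line =>
      let toks := (PySem.Str.split? line " ").getD []
      if !(toks.contains ctt) then output ++ " " ++ "\n"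
      else
        let toks2 := toks ++ ["<EOS>"]
        let tmp := extract_single_sequence toks2 ctt (PySem.Set.ofList pvSpecials) none
        output ++ PySem.Str.join " " tmp ++ "\n") ""
      = pieces.foldl (fun acc line => acc ++ pvChunk line ctt pvSpecials ++ "\n") "" := by
    apply PySem.List.foldl_congr_mem
    intro acc line hline
    rw [← pv_chunk_eq ctt line (hpre' line hline)]
    by_cases hc : ctt ∈ (PySem.Str.split? line " ").getD [] <;>
      simp [hc, String.append_assoc]
  rw [hcongr]
  have hmapfold : pieces.foldl (fun acc line => acc ++ pvChunk line ctt pvSpecials ++ "\n") ""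
      = (pieces.map (fun line => pvChunk line ctt pvSpecials)).foldl (fun o c => o ++ c ++ "\n") "" := by
    rw [List.foldl_map]
  rw [hmapfold]
  rw [pv_foldl_join _ "" (by
    simp only [ne_eq, List.map_eq_nil_iff]
    exact pv_split_ne_nil _)]
  apply String.toList_inj.mp
  simp only [String.toList_append, PySem.Str.toList_join, String.toList_empty, List.nil_append]
  rw [← hpieces]
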